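-- pv_equiv track=rewrite | github.com/tropical42/CSC-110 | Assignment 4/assign04_partB.py | smallest_increase
-- ===== SOURCE A (Python) =====
-- def smallest_increase(pop_stats):
--
--     li1 = [] #POPULATION LIST
--     li2 = [] #YEAR LIST
--     li3 = [] #POPULATION-INCREASE LIST
--
--     for (x,y) in pop_stats:
--         li2.append(x)
--         li1.append(y)
--
--     q = 0
--     p = 1
--     for i,j in zip(li1[0:],li1[1:]):
--         li3.append(li1[p]-li1[q])
--         q += 1
--         p += 1
--
--     value1 = li2[li3.index(min(li3))+1]
--     min_value = min(li3)
--
--     return value1,min_value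
-- ===== SOURCE B (Python) =====
-- def smallest_increase(pop_stats):
--     best = None
--     prev = None
--     for (x, y) in pop_stats:
--         if prev is not None:
--             inc = y - prev
--             if best is None or inc < best[1]:
--                 best = (x, inc)
--         prev = y
--     if best is None:
--         raise ValueError("need at least two entries")
--     return best
-- ===== Notes on version B (the rewrite author's own statement) =====
-- stated objective: simpler
-- what changed: B replaces A's three built-up intermediate lists plus the min() and list.index() passes by a single pass over the input pairs that keeps a running (year, increase) best, updating only on a strictly smaller increase so the first minimum wins.
import Mathlib
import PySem

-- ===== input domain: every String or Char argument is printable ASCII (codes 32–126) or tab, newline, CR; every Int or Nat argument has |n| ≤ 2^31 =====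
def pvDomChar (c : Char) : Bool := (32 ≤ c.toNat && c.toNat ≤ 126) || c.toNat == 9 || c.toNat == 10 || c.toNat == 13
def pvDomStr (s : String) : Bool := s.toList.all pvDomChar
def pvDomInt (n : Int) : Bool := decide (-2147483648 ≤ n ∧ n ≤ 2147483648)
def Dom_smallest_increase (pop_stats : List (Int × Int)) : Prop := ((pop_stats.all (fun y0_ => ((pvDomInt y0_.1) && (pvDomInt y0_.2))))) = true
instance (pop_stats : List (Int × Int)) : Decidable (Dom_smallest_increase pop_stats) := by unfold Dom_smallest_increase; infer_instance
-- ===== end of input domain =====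

-- B replaces A's three intermediate lists plus min/index passes by a single pass
-- keeping a running best (year, increase); objective: simpler, same asymptotic cost.

-- ===== PORT A =====
def smallest_increase (pop_stats : List (Int × Int)) : Int × Int :=
  let st := pop_stats.foldl
    (fun (s : List Int × List Int) (xy : Int × Int) => (s.1 ++ [xy.2], s.2 ++ [xy.1]))
    ([], [])
  let li1 := st.1   -- population list
  let li2 := st.2   -- year list
  let st3 := ((PySem.List.slice li1 (some 0) none).zip (PySem.List.slice li1 (some 1) none)).foldl
    (fun (s : List Int × Int × Int) (_ : Int × Int) =>
      (s.1 ++ [PySem.List.pyGetD li1 s.2.2 0 - PySem.List.pyGetD li1 s.2.1 0], s.2.1 + 1, s.2.2 + 1))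
    ([], 0, 1)
  let li3 := st3.1  -- population-increase list
  let value1 := PySem.List.pyGetD li2
    ((((PySem.List.index? li3 ((PySem.List.min? li3 (fun v => v)).getD 0)).getD 0 : Nat) : Int) + 1) 0
  let min_value := (PySem.List.min? li3 (fun v => v)).getD 0
  (value1, min_value)

-- ===== PORT B =====
def altGo : List (Int × Int) → Int → Option (Int × Int) → Option (Int × Int)
  | [], _, best => best
  | (x, y) :: rest, prev, best =>
      let inc := y - prev
      altGo rest y
        (match best with
         | none => some (x, inc)
         | some b => if inc < b.2 then some (x, inc) else some b)

def smallest_increase_alt (pop_stats : List (Int × Int)) : Int × Int :=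
  match pop_stats with
  | [] => (0, 0)            -- Source B raises ValueError here (outside Pre_)
  | (_, y) :: rest => (altGo rest y none).getD (0, 0)

-- ===== PRECONDITION & SPEC =====
-- Python A raises ValueError (min of an empty differences list) on lists of fewer
-- than two pairs; Source B raises ValueError there too, so those inputs are excluded.
def Pre_smallest_increase (pop_stats : List (Int × Int)) : Prop := 2 ≤ pop_stats.length
instance (pop_stats : List (Int × Int)) : Decidable (Pre_smallest_increase pop_stats) := by
  unfold Pre_smallest_increase; infer_instance

def pvWitness_smallest_increase : (List (Int × Int)) := [(2000, 100), (2001, 104), (2002, 105)]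

def Spec_smallest_increase (pop_stats : List (Int × Int)) (out : Int × Int) : Prop := out = smallest_increase_alt pop_stats
instance (pop_stats : List (Int × Int)) (out : Int × Int) : Decidable (Spec_smallest_increase pop_stats out) := by unfold Spec_smallest_increase; infer_instance

-- ===== CLAIM (what is proved, stated in full; the proofs are below) =====
def Claim_equal_smallest_increase : Prop := ∀ (pop_stats : List (Int × Int)), Dom_smallest_increase pop_stats → Pre_smallest_increase pop_stats → Spec_smallest_increase pop_stats (smallest_increase pop_stats)

-- ===== LEMMAS AND PROOFS =====

-- consecutive (year-of-later-element, increase) pairs starting from population `prev`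
def pairsFrom (prev : Int) : List (Int × Int) → List (Int × Int)
  | [] => []
  | (x, y) :: t => (x, y - prev) :: pairsFrom y t

-- one step of B's running-best update
def stepFM (best : Option (Int × Int)) (p : Int × Int) : Option (Int × Int) :=
  match best with
  | none => some p
  | some b => if p.2 < b.2 then some p else some b

-- recursive characterisation of the first minimal element (by second component)
def chooseMin : List (Int × Int) → Option (Int × Int)
  | [] => none
  | p :: t =>
      match chooseMin t with
      | none => some p
      | some q => some (if q.2 < p.2 then q else p)

-- what A computes on the pair list
def aPick (l : List (Int × Int)) : Int × Int :=
  let s := l.map Prod.snd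
  let mn := (PySem.List.min? s (fun v => v)).getD 0
  ((l.map Prod.fst).getD ((PySem.List.index? s mn).getD 0) 0, mn)

lemma altGo_eq_foldl : ∀ (l : List (Int × Int)) (prev : Int) (best : Option (Int × Int)),
    altGo l prev best = (pairsFrom prev l).foldl stepFM best := by
  intro l
  induction l with
  | nil => intro prev best; simp [altGo, pairsFrom]
  | cons p t ih =>
      intro prev best
      obtain ⟨x, y⟩ := p
      simp only [altGo, pairsFrom, List.foldl_cons, ih, stepFM]

lemma foldl_stepFM_some : ∀ (l : List (Int × Int)) (b : Int × Int),
    l.foldl stepFM (some b) =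
      some (match chooseMin l with | none => b | some q => if q.2 < b.2 then q else b) := by
  intro l
  induction l with
  | nil => intro b; simp [chooseMin]
  | cons p t ih =>
      intro b
      simp only [List.foldl_cons, stepFM, chooseMin]
      split_ifs with hpb <;> rw [ih] <;> cases h : chooseMin t <;>
        simp only [] <;> split_ifs <;> first | rfl | (exfalso; omega)

lemma foldl_stepFM_none (l : List (Int × Int)) : l.foldl stepFM none = chooseMin l := by
  cases l with
  | nil => simp [chooseMin]
  | cons p t =>
      simp only [List.foldl_cons, stepFM, foldl_stepFM_some, chooseMin]
      cases chooseMin t <;> simp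

lemma foldl_min_left (s : List Int) : ∀ (a b : Int), s.foldl min (min a b) = min a (s.foldl min b) := by
  induction s with
  | nil => intro a b; simp
  | cons h t ih =>
      intro a b
      simp only [List.foldl_cons, min_assoc, ih]

lemma foldl_min_mem (s : List Int) : ∀ (a : Int), s.foldl min a ∈ a :: s := by
  induction s with
  | nil => intro a; simp
  | cons h t ih =>
      intro a
      simp only [List.foldl_cons]
      rcases List.mem_cons.mp (ih (min a h)) with hm | hm
      · rcases min_choice a h with hc | hc <;> rw [hm, hc] <;> simp
      · simp [hm]

lemma chooseMin_spec : ∀ (t : List (Int × Int)) (p : Int × Int),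
    chooseMin (p :: t) = some (aPick (p :: t)) := by
  intro t
  induction t with
  | nil =>
      intro p
      simp [chooseMin, aPick, PySem.List.min?_id_cons]
  | cons p' t' ih =>
      intro p
      have hmem := foldl_min_mem (t'.map Prod.snd) p'.2
      have key : aPick (p :: p' :: t') =
          if (aPick (p' :: t')).2 < p.2 then aPick (p' :: t') else p := by
        simp only [aPick, List.map_cons, PySem.List.min?_id_cons, List.foldl_cons, Option.getD_some]
        rw [foldl_min_left]
        set mn' := (t'.map Prod.snd).foldl min p'.2 with hmn'
        by_cases hlt : mn' < p.2
        · have hminv : min p.2 mn' = mn' := min_eq_right (le_of_lt hlt)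
          rw [hminv]
          have hne : p.2 ≠ mn' := by omega
          rw [PySem.List.index?_cons_of_ne _ hne]
          have hsome : (PySem.List.index? (p'.2 :: t'.map Prod.snd) mn').isSome := by
            rw [PySem.List.index?_isSome_iff]; exact hmem
          obtain ⟨i, hi⟩ := Option.isSome_iff_exists.mp hsome
          rw [hi]
          simp [hlt]
        · have hle : p.2 ≤ mn' := by omega
          have hminv : min p.2 mn' = p.2 := min_eq_left hle
          rw [hminv, PySem.List.index?_cons_self]
          simp [hlt]
      rw [key]
      have hcm : chooseMin (p :: p' :: t')
          = match chooseMin (p' :: t') with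
            | none => some p
            | some q => some (if q.2 < p.2 then q else p) := rfl
      rw [hcm, ih p']

lemma foldl_build (ps : List (Int × Int)) : ∀ (a b : List Int),
    ps.foldl (fun (s : List Int × List Int) (xy : Int × Int) => (s.1 ++ [xy.2], s.2 ++ [xy.1])) (a, b)
      = (a ++ ps.map Prod.snd, b ++ ps.map Prod.fst) := by
  induction ps with
  | nil => intro a b; simp
  | cons p t ih => intro a b; simp [ih]

lemma fold3 (li1 : List Int) : ∀ (zs : List (Int × Int)) (acc : List Int) (q : Nat),
    zs.foldl (fun (s : List Int × Int × Int) (_ : Int × Int) =>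
        (s.1 ++ [PySem.List.pyGetD li1 s.2.2 0 - PySem.List.pyGetD li1 s.2.1 0], s.2.1 + 1, s.2.2 + 1))
      (acc, (q : Int), (q : Int) + 1)
    = (acc ++ (List.range zs.length).map (fun j => li1.getD (q + j + 1) 0 - li1.getD (q + j) 0),
       (q : Int) + zs.length, (q : Int) + zs.length + 1) := by
  intro zs
  induction zs with
  | nil => intro acc q; simp
  | cons z t ih =>
      intro acc q
      simp only [List.foldl_cons]
      have h1 : ((q : Int) + 1) = ((q + 1 : Nat) : Int) := by push_cast; ring
      have h2 : PySem.List.pyGetD li1 ((q : Int) + 1) 0 = li1.getD (q + 1) 0 := by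
        rw [h1, PySem.List.pyGetD_natCast]
      rw [h2, PySem.List.pyGetD_natCast]
      rw [show ((q : Int) + 1 + 1) = ((q + 1 : Nat) : Int) + 1 by push_cast; ring, h1]
      rw [ih]
      simp only [Prod.mk.injEq]
      refine ⟨?_, ?_, ?_⟩
      · have hfun : ((fun j => li1.getD (q + j + 1) 0 - li1.getD (q + j) 0) ∘ Nat.succ)
            = fun j => li1.getD (q + 1 + j + 1) 0 - li1.getD (q + 1 + j) 0 := by
          funext j
          simp only [Function.comp, Nat.succ_eq_add_one]
          rw [show q + (j + 1) + 1 = q + 1 + j + 1 by omega,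
              show q + (j + 1) = q + 1 + j by omega]
        rw [List.length_cons, List.range_succ_eq_map, List.map_cons, List.map_map, hfun,
          List.append_assoc, List.singleton_append]
        simp
      · simp only [List.length_cons]; push_cast; ring
      · simp only [List.length_cons]; push_cast; ring

lemma diffs_eq : ∀ (rest : List (Int × Int)) (y : Int),
    (List.range (rest.map Prod.snd).length).map
        (fun j => (y :: rest.map Prod.snd).getD (j + 1) 0 - (y :: rest.map Prod.snd).getD j 0)
      = (pairsFrom y rest).map Prod.snd := by
  intro rest
  induction rest with
  | nil => intro y; simp [pairsFrom]
  | cons p t ih =>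
      intro y
      obtain ⟨x, z⟩ := p
      have hfun : ((fun j => (y :: z :: t.map Prod.snd).getD (j + 1) 0 - (y :: z :: t.map Prod.snd).getD j 0) ∘ Nat.succ)
          = fun j => (z :: t.map Prod.snd).getD (j + 1) 0 - (z :: t.map Prod.snd).getD j 0 := by
        funext j
        simp only [Function.comp, Nat.succ_eq_add_one, List.getD_cons_succ]
      simp only [List.map_cons, List.length_cons, List.range_succ_eq_map, List.map_map, hfun,
        pairsFrom]
      rw [ih z]
      simp

lemma map_fst_pairsFrom : ∀ (rest : List (Int × Int)) (y : Int),
    (pairsFrom y rest).map Prod.fst = rest.map Prod.fst := by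
  intro rest
  induction rest with
  | nil => intro y; simp [pairsFrom]
  | cons p t ih => intro y; obtain ⟨x, z⟩ := p; simp [pairsFrom, ih]

lemma smallest_increase_eq_aPick (x y : Int) (rest : List (Int × Int)) :
    smallest_increase ((x, y) :: rest) = aPick (pairsFrom y rest) := by
  unfold smallest_increase
  rw [foldl_build]
  simp only [List.nil_append, List.map_cons]
  rw [PySem.List.slice_zero_start, PySem.List.slice_none_none, PySem.List.slice_from_one]
  simp only [List.tail_cons]
  have hf := fold3 (y :: rest.map Prod.snd) ((y :: rest.map Prod.snd).zip (rest.map Prod.snd)) [] 0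
  simp only [Nat.cast_zero, zero_add, List.nil_append] at hf
  have hz : ((y :: rest.map Prod.snd).zip (rest.map Prod.snd)).length = (rest.map Prod.snd).length := by
    simp [List.length_zip]
  rw [hz] at hf
  rw [hf, diffs_eq]
  unfold aPick
  set l := pairsFrom y rest with hl
  set s := l.map Prod.snd with hs
  set mn := (PySem.List.min? s (fun v => v)).getD 0 with hmn
  set i := (PySem.List.index? s mn).getD 0 with hi
  have hc : ((i : Int) + 1) = ((i + 1 : Nat) : Int) := by push_cast; ring
  rw [hc, PySem.List.pyGetD_natCast]
  simp only [List.getD_cons_succ]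
  rw [show rest.map Prod.fst = l.map Prod.fst from (map_fst_pairsFrom rest y).symm]

-- ===== VERDICT (by name: the statement is the Claim_ definition above) =====
theorem smallest_increase_spec : Claim_equal_smallest_increase := by
  intro ps _ hpre
  unfold Pre_smallest_increase at hpre
  unfold Spec_smallest_increase
  match ps, hpre with
  | (x, y) :: p :: t, _ =>
    rw [smallest_increase_eq_aPick]
    show aPick (pairsFrom y (p :: t)) = (altGo (p :: t) y none).getD (0, 0)
    rw [altGo_eq_foldl, foldl_stepFM_none]
    obtain ⟨px, pz⟩ := p
    rw [show pairsFrom y ((px, pz) :: t) = (px, pz - y) :: pairsFrom pz t from rfl,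
        chooseMin_spec, Option.getD_some]
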